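-- pv_equiv track=rewrite | github.com/mstendorf/adventofcode | day11/main2.py | find_distance_sum
-- ===== SOURCE A (Python) =====
-- def find_distance_between_points(point1, point2):
--     return abs(point1[0] - point2[0]) + abs(point1[1] - point2[1])
--
-- def find_distance_sum(idx_list):
--     sum = 0
--     if len(idx_list) == 1:
--         return 0
--
--     current = idx_list[0]
--     for point in idx_list[1:]:
--         distance = find_distance_between_points(current, point)
--         sum += distance
--     sum += find_distance_sum(idx_list[1:])
--     return sum
-- ===== SOURCE B (Python) =====
-- def find_distance_sum(idx_list):
--     def axis_sum(vals):
--         vals = sorted(vals)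
--         total = 0
--         prefix = 0
--         for i, v in enumerate(vals):
--             total += i * v - prefix
--             prefix += v
--         return total
--     return axis_sum([p[0] for p in idx_list]) + axis_sum([p[1] for p in idx_list])
-- ===== Notes on version B (the rewrite author's own statement) =====
-- stated objective: faster
-- what changed: Replaces the quadratic recursive all-pairs Manhattan scan by sorting each coordinate axis and summing pairwise absolute differences with a running prefix sum.
import Mathlib
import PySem

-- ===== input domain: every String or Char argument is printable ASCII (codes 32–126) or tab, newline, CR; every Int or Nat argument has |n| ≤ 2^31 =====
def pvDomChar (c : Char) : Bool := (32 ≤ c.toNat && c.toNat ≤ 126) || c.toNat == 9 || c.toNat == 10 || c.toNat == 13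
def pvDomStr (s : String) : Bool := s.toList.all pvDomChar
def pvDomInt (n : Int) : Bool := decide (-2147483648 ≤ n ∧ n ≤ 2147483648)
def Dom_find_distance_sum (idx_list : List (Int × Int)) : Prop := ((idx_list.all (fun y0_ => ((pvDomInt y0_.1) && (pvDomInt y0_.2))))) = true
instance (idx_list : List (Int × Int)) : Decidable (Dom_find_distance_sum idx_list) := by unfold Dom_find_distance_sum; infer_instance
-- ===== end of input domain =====

-- B replaces A's quadratic recursive all-pairs Manhattan scan by per-axis sorting with a
-- prefix-sum pass (asymptotically faster); A raises IndexError on [], excluded by Pre_.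


-- ===== PORT A =====
-- abs(point1[0] - point2[0]) + abs(point1[1] - point2[1])
def find_distance_between_points (point1 point2 : Int × Int) : Int :=
  |point1.1 - point2.1| + |point1.2 - point2.2|

-- literal port of A; on [] Python raises IndexError at idx_list[0] (excluded by Pre_), value 0 here is arbitrary
def find_distance_sum : List (Int × Int) → Int
  | [] => 0
  | [_] => 0
  | current :: rest =>
      (rest.foldl (fun s point => s + find_distance_between_points current point) 0)
        + find_distance_sum rest

-- ===== PORT B =====
-- one step of B's enumerate loop: state (total, i, prefix)
def pvAxisStep (acc : Int × Int × Int) (v : Int) : Int × Int × Int :=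
  (acc.1 + acc.2.1 * v - acc.2.2, acc.2.1 + 1, acc.2.2 + v)

def pvAxisSum (vals : List Int) : Int :=
  ((PySem.List.sorted vals (fun x => x) false).foldl pvAxisStep (0, 0, 0)).1

def find_distance_sum_alt (idx_list : List (Int × Int)) : Int :=
  pvAxisSum (idx_list.map Prod.fst) + pvAxisSum (idx_list.map Prod.snd)

-- ===== PRECONDITION & SPEC =====
-- Python A raises IndexError on the empty list (idx_list[0]); that is the only exclusion.
def Pre_find_distance_sum (idx_list : List (Int × Int)) : Prop := idx_list ≠ []
instance (idx_list : List (Int × Int)) : Decidable (Pre_find_distance_sum idx_list) := by unfold Pre_find_distance_sum; infer_instance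
def pvWitness_find_distance_sum : (List (Int × Int)) := [(0, 0), (1, 2), (-3, 4)]

def Spec_find_distance_sum (idx_list : List (Int × Int)) (out : Int) : Prop := out = find_distance_sum_alt idx_list
instance (idx_list : List (Int × Int)) (out : Int) : Decidable (Spec_find_distance_sum idx_list out) := by unfold Spec_find_distance_sum; infer_instance

-- ===== CLAIM (what is proved, stated in full; the proofs are below) =====
def Claim_equal_find_distance_sum : Prop := ∀ (idx_list : List (Int × Int)), Dom_find_distance_sum idx_list → Pre_find_distance_sum idx_list → Spec_find_distance_sum idx_list (find_distance_sum idx_list)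

-- ===== LEMMAS AND PROOFS =====

-- mathematical pairwise sum (same recursion shape as A)
def pvPairSum : List (Int × Int) → Int
  | [] => 0
  | c :: r => (r.map (fun p => find_distance_between_points c p)).sum + pvPairSum r

-- per-axis pairwise sum of absolute differences
def pvQ : List Int → Int
  | [] => 0
  | v :: r => (r.map (fun w => |v - w|)).sum + pvQ r

-- sorted-list form of pvQ (head is minimal, so |v - w| = w - v)
def pvC : List Int → Int
  | [] => 0
  | v :: r => r.sum - v * r.length + pvC r

theorem pvSum_map_dist (c : Int × Int) (r : List (Int × Int)) :
    (r.map (fun p => find_distance_between_points c p)).sum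
      = ((r.map Prod.fst).map (fun w => |c.1 - w|)).sum
        + ((r.map Prod.snd).map (fun w => |c.2 - w|)).sum := by
  induction r with
  | nil => rfl
  | cons b t ih =>
    simp only [List.map_cons, List.sum_cons, ih]
    simp only [find_distance_between_points]
    ring

theorem pvSum_map_abs (v : Int) (r : List Int) (h : ∀ w ∈ r, v ≤ w) :
    (r.map (fun w => |v - w|)).sum = r.sum - v * r.length := by
  induction r with
  | nil => simp
  | cons b t ih =>
    have hb : v ≤ b := h b (by simp)
    rw [List.map_cons, List.sum_cons, List.length_cons,
        ih (fun w hw => h w (by simp [hw])), abs_of_nonpos (by omega), List.sum_cons]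
    push_cast; ring

theorem pvA_eq_pairSum (l : List (Int × Int)) : find_distance_sum l = pvPairSum l := by
  induction l with
  | nil => rfl
  | cons c r ih =>
    cases r with
    | nil => rfl
    | cons b t =>
      rw [show find_distance_sum (c :: b :: t)
            = ((b :: t).foldl (fun s point => s + find_distance_between_points c point) 0)
              + find_distance_sum (b :: t) from rfl,
          PySem.List.foldl_add, ih, zero_add]
      rfl

theorem pvPairSum_split (l : List (Int × Int)) :
    pvPairSum l = pvQ (l.map Prod.fst) + pvQ (l.map Prod.snd) := by
  induction l with
  | nil => rfl
  | cons c r ih =>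
    simp only [pvPairSum, pvQ, List.map_cons, ih]
    rw [pvSum_map_dist]
    ring

theorem pvQ_perm {xs ys : List Int} (h : xs.Perm ys) : pvQ xs = pvQ ys := by
  induction h with
  | nil => rfl
  | cons x h ih =>
    simp only [pvQ, ih]
    rw [List.Perm.sum_eq (List.Perm.map _ h)]
  | swap x y l =>
    simp only [pvQ, List.map_cons, List.sum_cons]
    rw [abs_sub_comm x y]
    ring
  | trans _ _ ih1 ih2 => exact ih1.trans ih2

theorem pvQ_eq_pvC_of_sorted {s : List Int} (h : s.Pairwise (· ≤ ·)) : pvQ s = pvC s := by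
  induction s with
  | nil => rfl
  | cons v r ih =>
    rcases List.pairwise_cons.mp h with ⟨hv, hr⟩
    simp only [pvQ, pvC, ih hr]
    rw [pvSum_map_abs v r hv]

theorem pvFoldl_axisStep (s : List Int) : ∀ t i p : Int,
    (s.foldl pvAxisStep (t, i, p)).1 = t + i * s.sum - p * s.length + pvC s := by
  induction s with
  | nil => intro t i p; simp [pvC]
  | cons v r ih =>
    intro t i p
    simp only [List.foldl_cons, pvAxisStep, ih, pvC, List.sum_cons, List.length_cons]
    push_cast; ring

theorem pvAxisSum_eq_pvQ (vals : List Int) : pvAxisSum vals = pvQ vals := by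
  unfold pvAxisSum
  rw [pvFoldl_axisStep]
  rw [← pvQ_eq_pvC_of_sorted (by simpa using PySem.List.sorted_pairwise vals (fun x => x))]
  rw [pvQ_perm (PySem.List.sorted_perm vals (fun x => x) false)]
  have h := (PySem.List.sorted_perm vals (fun x => x) false)
  rw [h.sum_eq, h.length_eq]
  ring

-- ===== VERDICT (by name: the statement is the Claim_ definition above) =====
theorem find_distance_sum_spec : Claim_equal_find_distance_sum := by
  intro l _ _
  unfold Spec_find_distance_sum find_distance_sum_alt
  rw [pvA_eq_pairSum, pvPairSum_split, pvAxisSum_eq_pvQ, pvAxisSum_eq_pvQ]
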